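-- pv_equiv track=rewrite | github.com/1-thread/ua-sandbox | apps/ua-ontology/generate_html.py | by_phase
-- ===== SOURCE A (Python) =====
-- from collections import defaultdict
--
-- def by_phase(funcs):
--     phases = defaultdict(list)
--     for f in funcs:
--         phases[f.get("phase","Unspecified")].append(f)
--     # Sort phases in a sensible order if common names are used
--     PHASE_ORDER = ["R&D","Development","Production","Post","Other","Unspecified"]
--     # Anything not in PHASE_ORDER goes alphabetically after
--     present = set(phases.keys())
--     ordered = []
--     for p in PHASE_ORDER:
--         if p in phases:
--             ordered.append((p, phases[p]))
--     for p in sorted(present - set(PHASE_ORDER)):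
--         ordered.append((p, phases[p]))
--     return ordered
-- ===== SOURCE B (Python) =====
-- def by_phase(funcs):
--     PHASE_ORDER = ["R&D","Development","Production","Post","Other","Unspecified"]
--     phases = {}
--     for f in funcs:
--         phases.setdefault(f.get("phase", "Unspecified"), []).append(f)
--     def key(p):
--         # known phases first, in priority order; the rest after, alphabetically
--         return (PHASE_ORDER.index(p), "") if p in PHASE_ORDER else (len(PHASE_ORDER), p)
--     return [(p, phases[p]) for p in sorted(phases, key=key)]
-- ===== Notes on version B (the rewrite author's own statement) =====
-- stated objective: simpler
-- what changed: The two separate ordering passes (scan of the priority list, then a sorted pass over the leftover set) are replaced by one sort of the present phase keys under a composite priority key, mapped once to (phase, group) pairs.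
import Mathlib
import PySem

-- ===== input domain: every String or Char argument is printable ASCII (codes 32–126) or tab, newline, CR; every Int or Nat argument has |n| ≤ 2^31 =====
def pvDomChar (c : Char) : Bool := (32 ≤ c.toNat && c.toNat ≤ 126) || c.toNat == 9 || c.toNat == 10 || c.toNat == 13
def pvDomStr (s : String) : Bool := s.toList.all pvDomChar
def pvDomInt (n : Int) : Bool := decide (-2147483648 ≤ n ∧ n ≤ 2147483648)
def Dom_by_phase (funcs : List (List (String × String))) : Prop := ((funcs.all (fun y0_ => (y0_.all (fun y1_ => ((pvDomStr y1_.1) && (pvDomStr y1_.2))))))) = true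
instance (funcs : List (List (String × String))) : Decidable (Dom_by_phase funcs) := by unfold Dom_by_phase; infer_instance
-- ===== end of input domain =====

-- B replaces A's two ordering passes (priority-list scan, then sorted leftovers) by one
-- composite-key sort of the present phase keys; the grouping pass is unchanged (objective: simpler).

-- ===== PORT A =====
def PHASE_ORDER : List String := ["R&D", "Development", "Production", "Post", "Other", "Unspecified"]

def by_phase (funcs : List (List (String × String))) : List (String × (List (List (String × String)))) :=
  -- phases = defaultdict(list); for f in funcs: phases[f.get("phase","Unspecified")].append(f)
  let phases : PySem.Dict String (List (List (String × String))) :=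
    funcs.foldl (fun d f =>
      d.modify (PySem.Dict.getD (PySem.Dict.mk f) "phase" "Unspecified") [] (fun l => l ++ [f]))
      PySem.Dict.empty
  let present : PySem.Set String := PySem.Set.ofList phases.keys
  -- for p in PHASE_ORDER: if p in phases: ordered.append((p, phases[p]))
  -- phases[p] is exact as getD: p is a present key in both loops, so the defaultdict never inserts
  let ordered : List (String × (List (List (String × String)))) :=
    PHASE_ORDER.foldl (fun acc p =>
      if phases.contains p then acc ++ [(p, phases.getD p [])] else acc) []
  -- for p in sorted(present - set(PHASE_ORDER)): ordered.append((p, phases[p]))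
  (PySem.List.sorted (PySem.Set.diff present (PySem.Set.ofList PHASE_ORDER)) (fun x => x)).foldl
    (fun acc p => acc ++ [(p, phases.getD p [])]) ordered

-- ===== PORT B =====
-- Source B's composite key(p) = (PHASE_ORDER.index(p), "") if p in PHASE_ORDER else (len(PHASE_ORDER), p),
-- split into its two tuple components for PySem.List.sorted2
def phaseKey1 (p : String) : Int :=
  match PySem.List.index? PHASE_ORDER p with
  | some i => (i : Int)
  | none => (PHASE_ORDER.length : Int)

def phaseKey2 (p : String) : String :=
  if PHASE_ORDER.contains p then "" else p

def by_phase_alt (funcs : List (List (String × String))) : List (String × (List (List (String × String)))) :=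
  -- phases = {}; for f in funcs: phases.setdefault(f.get("phase","Unspecified"), []).append(f)
  let phases : PySem.Dict String (List (List (String × String))) :=
    funcs.foldl (fun d f =>
      d.modify (PySem.Dict.getD (PySem.Dict.mk f) "phase" "Unspecified") [] (fun l => l ++ [f]))
      PySem.Dict.empty
  -- [(p, phases[p]) for p in sorted(phases, key=key)]; phases[p] exact as getD (p is a key)
  (PySem.List.sorted2 phases.keys phaseKey1 phaseKey2).map (fun p => (p, phases.getD p []))

-- ===== PRECONDITION & SPEC =====
def Spec_by_phase (funcs : List (List (String × String))) (out : List (String × (List (List (String × String))))) : Prop := out = by_phase_alt funcs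
instance (funcs : List (List (String × String))) (out : List (String × (List (List (String × String))))) : Decidable (Spec_by_phase funcs out) := by unfold Spec_by_phase; infer_instance

-- ===== CLAIM (what is proved, stated in full; the proofs are below) =====
def Claim_equal_by_phase : Prop := ∀ (funcs : List (List (String × String))), Dom_by_phase funcs → Spec_by_phase funcs (by_phase funcs)

-- ===== LEMMAS AND PROOFS =====

lemma flatMap_singleton_eq_map {α β : Type} (f : α → β) (l : List α) :
    List.flatMap (fun p => [f p]) l = List.map f l := by
  induction l with
  | nil => rfl
  | cons x xs ih => simp [List.flatMap_cons, ih]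

-- the strict order Source B's composite key induces on phase names
def lexPK (a b : String) : Prop :=
  phaseKey1 a < phaseKey1 b ∨ (phaseKey1 a = phaseKey1 b ∧ phaseKey2 a < phaseKey2 b)

-- the Boolean "strictly before" test sorted2 uses
def bfPK (a b : String) : Bool :=
  decide (phaseKey1 a < phaseKey1 b) || (!decide (phaseKey1 b < phaseKey1 a) && decide (phaseKey2 a < phaseKey2 b))

lemma bfPK_iff (a b : String) : bfPK a b = true ↔ lexPK a b := by
  unfold bfPK lexPK
  rcases lt_trichotomy (phaseKey1 a) (phaseKey1 b) with h | h | h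
  · simp [h, not_lt.mpr h.le]
  · simp [h]
  · simp [h, not_lt.mpr h.le, (ne_of_gt h)]

lemma lexPK_asymm {a b : String} (h1 : lexPK a b) (h2 : lexPK b a) : False := by
  rcases h1 with h1 | ⟨e1, s1⟩ <;> rcases h2 with h2 | ⟨e2, s2⟩
  · omega
  · omega
  · omega
  · exact absurd s2 (lt_asymm s1)

lemma lexPK_trans {a b c : String} (h1 : lexPK a b) (h2 : lexPK b c) : lexPK a c := by
  rcases h1 with h1 | ⟨e1, s1⟩ <;> rcases h2 with h2 | ⟨e2, s2⟩
  · exact Or.inl (lt_trans h1 h2)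
  · exact Or.inl (by omega)
  · exact Or.inl (by omega)
  · exact Or.inr ⟨e1.trans e2, lt_trans s1 s2⟩

lemma rank_lt_of_mem {p : String} (h : p ∈ PHASE_ORDER) : phaseKey1 p < 6 := by
  have hall : ∀ q ∈ PHASE_ORDER, phaseKey1 q < 6 := by decide
  exact hall p h

lemma rank_of_not_mem {p : String} (h : p ∉ PHASE_ORDER) : phaseKey1 p = 6 := by
  unfold phaseKey1
  rw [(PySem.List.index?_eq_none_iff PHASE_ORDER p).mpr h]
  rfl

lemma tie_of_not_mem {p : String} (h : p ∉ PHASE_ORDER) : phaseKey2 p = p := by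
  unfold phaseKey2
  rw [if_neg (by simpa using h)]

lemma pk_inj {a b : String} (h1 : phaseKey1 a = phaseKey1 b) (h2 : phaseKey2 a = phaseKey2 b) :
    a = b := by
  by_cases ha : a ∈ PHASE_ORDER <;> by_cases hb : b ∈ PHASE_ORDER
  · have hall : ∀ x ∈ PHASE_ORDER, ∀ y ∈ PHASE_ORDER, phaseKey1 x = phaseKey1 y → x = y := by decide
    exact hall a ha b hb h1
  · have := rank_lt_of_mem ha; rw [rank_of_not_mem hb] at h1; omega
  · have := rank_lt_of_mem hb; rw [rank_of_not_mem ha] at h1; omega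
  · rw [← tie_of_not_mem ha, ← tie_of_not_mem hb]; exact h2

lemma lexPK_total {a b : String} (hne : a ≠ b) : lexPK a b ∨ lexPK b a := by
  rcases lt_trichotomy (phaseKey1 a) (phaseKey1 b) with h | h | h
  · exact Or.inl (Or.inl h)
  · rcases lt_trichotomy (phaseKey2 a) (phaseKey2 b) with h2 | h2 | h2
    · exact Or.inl (Or.inr ⟨h, h2⟩)
    · exact absurd (pk_inj h h2) hne
    · exact Or.inr (Or.inr ⟨h.symm, h2⟩)
  · exact Or.inr (Or.inl h)

lemma bfPK_asymm {a b : String} (h : bfPK a b = true) : bfPK b a = false := by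
  cases hba : bfPK b a
  · rfl
  · exact absurd (lexPK_asymm ((bfPK_iff a b).mp h) ((bfPK_iff b a).mp hba)) (by simp)

lemma insertBy_pairwise_bfPK (x : String) (ys : List String)
    (h : ys.Pairwise (fun a b => bfPK b a = false)) :
    (PySem.List.insertBy bfPK x ys).Pairwise (fun a b => bfPK b a = false) := by
  induction ys with
  | nil => simp [PySem.List.insertBy]
  | cons y ys ih =>
    rw [List.pairwise_cons] at h
    by_cases hxy : bfPK x y = true
    · simp only [PySem.List.insertBy, hxy, if_true]
      refine List.pairwise_cons.mpr ⟨?_, List.pairwise_cons.mpr h⟩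
      intro z hz
      rcases List.mem_cons.mp hz with rfl | hz'
      · exact bfPK_asymm hxy
      · cases hzx : bfPK z x
        · rfl
        · -- z before x and x before y would force z before y, refuted by sortedness of y :: ys
          have hzy : lexPK z y := lexPK_trans ((bfPK_iff z x).mp hzx) ((bfPK_iff x y).mp hxy)
          have := h.1 z hz'
          rw [← Bool.not_eq_true, bfPK_iff] at this
          exact absurd hzy this
    · simp only [PySem.List.insertBy, hxy]
      refine List.pairwise_cons.mpr ⟨?_, ih h.2⟩
      intro z hz
      rcases (PySem.List.insertBy_mem_iff bfPK x z ys).mp hz with rfl | hz'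
      · exact Bool.not_eq_true _ ▸ hxy
      · exact h.1 z hz'

lemma foldl_insertBy_pairwise_bfPK (xs : List String) :
    ∀ acc : List String, acc.Pairwise (fun a b => bfPK b a = false) →
      (xs.foldl (fun acc x => PySem.List.insertBy bfPK x acc) acc).Pairwise
        (fun a b => bfPK b a = false) := by
  induction xs with
  | nil => intro acc h; simpa using h
  | cons x xs ih => intro acc h; exact ih _ (insertBy_pairwise_bfPK x acc h)

-- sorted2 under Source B's key equals any strictly lexPK-increasing rearrangement
lemma sorted2_pk_eq (xs ys : List String) (hnd : xs.Nodup) (hperm : ys.Perm xs)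
    (hpw : ys.Pairwise lexPK) :
    PySem.List.sorted2 xs phaseKey1 phaseKey2 = ys := by
  have hfold : PySem.List.sorted2 xs phaseKey1 phaseKey2 =
      xs.foldl (fun acc x => PySem.List.insertBy bfPK x acc) [] := rfl
  have hperm2 : (PySem.List.sorted2 xs phaseKey1 phaseKey2).Perm xs :=
    PySem.List.sorted2_perm xs phaseKey1 phaseKey2 false
  have hnd2 : (PySem.List.sorted2 xs phaseKey1 phaseKey2).Nodup := hperm2.symm.nodup hnd
  have hW : (PySem.List.sorted2 xs phaseKey1 phaseKey2).Pairwise (fun a b => bfPK b a = false) := by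
    rw [hfold]; exact foldl_insertBy_pairwise_bfPK xs [] (List.Pairwise.nil)
  have hlex : (PySem.List.sorted2 xs phaseKey1 phaseKey2).Pairwise lexPK := by
    refine (hW.and hnd2).imp ?_
    rintro a b ⟨hbf, hne⟩
    refine (lexPK_total hne).resolve_right (fun hba => ?_)
    rw [← Bool.not_eq_true, bfPK_iff] at hbf
    exact hbf hba
  exact List.eq_of_perm_of_sorted (fun a b _ _ h1 h2 => (lexPK_asymm h1 h2).elim)
    hlex hpw (hperm2.trans hperm.symm)

-- the composite-key sort of a duplicate-free key list is exactly A's two ordering passes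
lemma key_order (K : List String) (hK : K.Nodup) :
    PySem.List.sorted2 K phaseKey1 phaseKey2 =
      PHASE_ORDER.filter (fun p => decide (p ∈ K)) ++
        PySem.List.sorted (K.filter (fun x => !(PHASE_ORDER.contains x))) (fun x => x) := by
  have hPOnd : PHASE_ORDER.Nodup := by decide
  have hS := PySem.List.sorted_perm (K.filter fun x => !(PHASE_ORDER.contains x)) (fun x => x) false
  apply sorted2_pk_eq K _ hK
  · -- permutation of K
    have h1 : (PHASE_ORDER.filter (fun p => decide (p ∈ K))).Perm
        (K.filter (fun p => PHASE_ORDER.contains p)) := by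
      rw [List.perm_ext_iff_of_nodup (hPOnd.filter _) (hK.filter _)]
      intro a
      simp only [List.mem_filter, decide_eq_true_iff, List.contains_iff_mem]
      tauto
    exact (h1.append hS).trans (List.filter_append_perm _ K)
  · -- strictly lexPK-increasing
    rw [List.pairwise_append]
    refine ⟨?_, ?_, ?_⟩
    · have hpo : PHASE_ORDER.Pairwise (fun a b => phaseKey1 a < phaseKey1 b) := by decide
      exact (List.Pairwise.sublist List.filter_sublist hpo).imp (fun h => Or.inl h)
    · have hle := PySem.List.sorted_pairwise (K.filter fun x => !(PHASE_ORDER.contains x)) (fun x => x)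
      have hndS := hS.symm.nodup (hK.filter _)
      refine List.Pairwise.imp_of_mem ?_ ((hle.and hndS).imp
        (fun h => lt_of_le_of_ne h.1 h.2) (l := _))
      intro a b ha hb hab
      have ha' : a ∉ PHASE_ORDER := by
        have := (List.mem_filter.mp ((PySem.List.mem_sorted _ _ _ _).mp ha)).2
        simpa using this
      have hb' : b ∉ PHASE_ORDER := by
        have := (List.mem_filter.mp ((PySem.List.mem_sorted _ _ _ _).mp hb)).2
        simpa using this
      exact Or.inr ⟨by rw [rank_of_not_mem ha', rank_of_not_mem hb'],
        by rw [tie_of_not_mem ha', tie_of_not_mem hb']; exact hab⟩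
    · intro a ha b hb
      have ha' : a ∈ PHASE_ORDER := (List.mem_filter.mp ha).1
      have hb' : b ∉ PHASE_ORDER := by
        have := (List.mem_filter.mp ((PySem.List.mem_sorted _ _ _ _).mp hb)).2
        simpa using this
      exact Or.inl (by have := rank_lt_of_mem ha'; rw [rank_of_not_mem hb']; omega)

-- ===== VERDICT (by name: the statement is the Claim_ definition above) =====
theorem by_phase_spec : Claim_equal_by_phase := by
  intro funcs _
  unfold Spec_by_phase
  simp only [by_phase, by_phase_alt]
  set G : PySem.Dict String (List (List (String × String))) :=
    funcs.foldl (fun d f =>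
      d.modify (PySem.Dict.getD (PySem.Dict.mk f) "phase" "Unspecified") [] (fun l => l ++ [f]))
      PySem.Dict.empty with hG
  have hK : G.keys.Nodup := by
    rw [hG]
    exact PySem.Dict.nodup_keys_foldl_modify_key funcs
      (fun f => PySem.Dict.getD (PySem.Dict.mk f) "phase" "Unspecified") []
      (fun _ f l => l ++ [f]) PySem.Dict.empty (by simp)
  rw [PySem.List.foldl_append_eq_flatMap (fun p => [(p, G.getD p [])]),
    PySem.List.foldl_append_if (fun p => G.contains p) (fun p => (p, G.getD p []))]
  simp only [List.nil_append]
  rw [List.filter_congr (fun x _ => PySem.Dict.contains_eq_decide_mem_keys G x)]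
  have hofK : PySem.Set.ofList G.keys = G.keys := PySem.Set.ofList_eq_self_of_nodup _ hK
  have hofPO : PySem.Set.ofList PHASE_ORDER = PHASE_ORDER :=
    PySem.Set.ofList_eq_self_of_nodup _ (by decide)
  rw [hofK, hofPO]
  have hdiff : PySem.Set.diff G.keys PHASE_ORDER =
      G.keys.filter (fun x => !(PHASE_ORDER.contains x)) := rfl
  rw [hdiff, key_order G.keys hK, List.map_append]
  exact congrArg₂ (· ++ ·) rfl (flatMap_singleton_eq_map (fun p => (p, G.getD p [])) _)
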